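-- pv_equiv track=rewrite | github.com/MqZhang2019/Whisper-based-project | main.py | smart_append_text
-- ===== SOURCE A (Python) =====
-- def smart_append_text(current_text, new_text):
--     """
--     Intelligently append new text to current text, avoiding duplicates and handling sentence breaks
--     Args:
--         current_text: Existing transcribed text
--         new_text: New text to append
--     Returns:
--         Combined text with proper spacing and formatting
--     """
--     if not new_text:
--         return current_text
--
--     new_text = new_text.lstrip()
--     if not current_text:
--         return new_text
--
--     # Check for overlapping text
--     overlap_length = 0
--     max_check = min(len(current_text), len(new_text))
--
--     for i in range(1, max_check + 1):
--         if current_text[-i:] == new_text[:i]: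
--             overlap_length = i
--
--     if overlap_length > 0:
--         return current_text + new_text[overlap_length:]
--
--     if not current_text.endswith((' ', '.', '?', '!', ',', ';', ':', '-')):
--         return current_text + " " + new_text
--
--     return current_text + new_text
-- ===== SOURCE B (Python) =====
-- def smart_append_text(current_text, new_text):
--     """
--     Same behaviour as A, but the longest suffix(current)/prefix(new) overlap is
--     found in O(len) with the KMP prefix-function of new + '\x00' + current,
--     instead of A's quadratic scan over all overlap lengths.
--     """
--     if not new_text:
--         return current_text
--
--     new_text = new_text.lstrip()
--     if not current_text:
--         return new_text
--
--     # KMP prefix function of s; '\x00' separator cannot occur in the inputs,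
--     # so pi at the last position is the longest prefix of new_text that is a
--     # suffix of current_text (and it is automatically <= both lengths).
--     s = new_text + "\x00" + current_text
--     pi = [0] * len(s)
--     k = 0
--     for i in range(1, len(s)):
--         while k > 0 and s[i] != s[k]:
--             k = pi[k - 1]
--         if s[i] == s[k]:
--             k += 1
--         pi[i] = k
--     overlap_length = k
--
--     if overlap_length > 0:
--         return current_text + new_text[overlap_length:]
--
--     if not current_text.endswith((' ', '.', '?', '!', ',', ';', ':', '-')):
--         return current_text + " " + new_text
--
--     return current_text + new_text
-- ===== Notes on version B (the rewrite author's own statement) =====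
-- stated objective: faster
-- what changed: The longest suffix/prefix overlap is computed with the KMP prefix function of new_text + '\x00' + current_text in linear time, instead of A's scan that compares a pair of slices for every candidate overlap length.
import Mathlib
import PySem

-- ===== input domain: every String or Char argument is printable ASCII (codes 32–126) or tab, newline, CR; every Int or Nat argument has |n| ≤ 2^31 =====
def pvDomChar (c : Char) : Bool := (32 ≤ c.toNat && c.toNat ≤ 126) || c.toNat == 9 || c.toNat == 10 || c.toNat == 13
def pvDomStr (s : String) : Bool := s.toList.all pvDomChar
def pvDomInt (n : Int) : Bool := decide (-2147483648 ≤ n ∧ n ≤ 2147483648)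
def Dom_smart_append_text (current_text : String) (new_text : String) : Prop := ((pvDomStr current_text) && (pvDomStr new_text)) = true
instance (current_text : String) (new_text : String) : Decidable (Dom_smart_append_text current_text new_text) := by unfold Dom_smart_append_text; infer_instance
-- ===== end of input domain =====

-- B replaces A's quadratic all-overlap-lengths scan by the KMP prefix function of
-- new_text + '\x00' + current_text (objective: faster).

-- ===== PORT A =====
def smart_append_text (current_text : String) (new_text : String) : String :=
  if PySem.Str.len new_text == 0 then current_text
  else
    let new_text := PySem.Str.lstrip new_text
    if PySem.Str.len current_text == 0 then new_text
    else
      let c := current_text.toList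
      let n := new_text.toList
      let max_check : Int := min c.length n.length
      let overlap_length : Int :=
        (PySem.List.pyRange 1 (max_check + 1) 1).foldl
          (fun ov i =>
            if PySem.List.slice c (some (-i)) none = PySem.List.slice n none (some i) then i
            else ov) 0
      if overlap_length > 0 then
        String.ofList (c ++ PySem.List.slice n (some overlap_length) none)
      else if !(PySem.Str.endswith current_text " " || PySem.Str.endswith current_text "." ||
                PySem.Str.endswith current_text "?" || PySem.Str.endswith current_text "!" ||
                PySem.Str.endswith current_text "," || PySem.Str.endswith current_text ";" ||
                PySem.Str.endswith current_text ":" || PySem.Str.endswith current_text "-") then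
        String.ofList (c ++ [' '] ++ n)
      else
        String.ofList (c ++ n)

-- ===== PORT B =====
-- Source B's inner `while k > 0 and s[i] != s[k]: k = pi[k-1]`; the fuel argument only
-- makes the recursion structural — with fuel ≥ k it never runs out, because the
-- pi entries read satisfy pi[j] ≤ j (proved below), so k strictly decreases.
def kmpFall (s : List Char) (pi : List Nat) (c : Char) : Nat → Nat → Nat
  | 0, k => k
  | fuel+1, k =>
    if 0 < k ∧ ¬ (s.getD k ' ' = c) then kmpFall s pi c fuel (pi.getD (k-1) 0) else k

-- Source B's `for i in range(1, len(s))` building the prefix-function table pi;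
-- the state is (pi so far, current k); pi[i] = k is the append.
def kmpLoop (s : List Char) : List Nat × Nat :=
  (List.range' 1 (s.length - 1)).foldl
    (fun st i =>
      let k1 := kmpFall s st.1 (s.getD i ' ') st.2 st.2
      let k2 := if s.getD i ' ' = s.getD k1 ' ' then k1 + 1 else k1
      (st.1 ++ [k2], k2))
    ([0], 0)

def smart_append_text_alt (current_text : String) (new_text : String) : String :=
  if PySem.Str.len new_text == 0 then current_text
  else
    let new_text := PySem.Str.lstrip new_text
    if PySem.Str.len current_text == 0 then new_text
    else
      let c := current_text.toList
      let n := new_text.toList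
      let s := n ++ '\x00' :: c
      let overlap_length : Nat := (kmpLoop s).2
      if overlap_length > 0 then
        String.ofList (c ++ PySem.List.slice n (some (overlap_length : Int)) none)
      else if !(PySem.Str.endswith current_text " " || PySem.Str.endswith current_text "." ||
                PySem.Str.endswith current_text "?" || PySem.Str.endswith current_text "!" ||
                PySem.Str.endswith current_text "," || PySem.Str.endswith current_text ";" ||
                PySem.Str.endswith current_text ":" || PySem.Str.endswith current_text "-") then
        String.ofList (c ++ [' '] ++ n)
      else
        String.ofList (c ++ n)

-- ===== PRECONDITION & SPEC =====
def Spec_smart_append_text (current_text : String) (new_text : String) (out : String) : Prop := out = smart_append_text_alt current_text new_text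
instance (current_text : String) (new_text : String) (out : String) : Decidable (Spec_smart_append_text current_text new_text out) := by unfold Spec_smart_append_text; infer_instance

-- ===== CLAIM (what is proved, stated in full; the proofs are below) =====
def Claim_equal_smart_append_text : Prop := ∀ (current_text : String) (new_text : String), Dom_smart_append_text current_text new_text → Spec_smart_append_text current_text new_text (smart_append_text current_text new_text)

-- ===== LEMMAS AND PROOFS =====

-- pf s m = length of the longest proper border of s.take m (the prefix function).
def pf (s : List Char) (m : ℕ) : ℕ :=
  Nat.findGreatest (fun k => s.take k <:+ s.take m) (m - 1)

-- ov c n = the overlap A's loop looks for: the greatest i ≤ min lengths with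
-- current[-i:] == new[:i].
def ov (c n : List Char) : ℕ :=
  Nat.findGreatest (fun i => c.drop (c.length - i) = n.take i) (min c.length n.length)

lemma take_succ_getD (s : List Char) (m : ℕ) (h : m < s.length) :
    s.take (m+1) = s.take m ++ [s.getD m ' '] := by
  rw [List.take_add_one, List.getElem?_eq_getElem h]
  simp [List.getD_eq_getElem?_getD, List.getElem?_eq_getElem h]

lemma suffix_concat_iff (a b : List Char) (x y : Char) :
    (a ++ [x] <:+ b ++ [y]) ↔ (x = y ∧ a <:+ b) := by
  rw [← List.reverse_prefix, List.reverse_append, List.reverse_append]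
  simp [List.cons_prefix_cons]

lemma suffix_of_suffix_le {l₁ l₂ l₃ : List Char} (h1 : l₁ <:+ l₃) (h2 : l₂ <:+ l₃)
    (h : l₁.length ≤ l₂.length) : l₁ <:+ l₂ := by
  rw [← List.reverse_prefix] at h1 h2 ⊢
  exact List.prefix_of_prefix_length_le h1 h2 (by simpa)

lemma border_succ_iff (s : List Char) (m k : ℕ) (hm : m < s.length) (hk : k < s.length) :
    (s.take (k+1) <:+ s.take (m+1)) ↔ (s.getD k ' ' = s.getD m ' ' ∧ s.take k <:+ s.take m) := by
  rw [take_succ_getD s m hm, take_succ_getD s k hk, suffix_concat_iff]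

lemma pf_le (s : List Char) (m : ℕ) : pf s m ≤ m - 1 := Nat.findGreatest_le _
lemma pf_lt (s : List Char) (m : ℕ) (hm : 1 ≤ m) : pf s m < m := by
  have := pf_le s m; omega

lemma pf_suffix (s : List Char) (m : ℕ) : s.take (pf s m) <:+ s.take m := by
  have h := Nat.findGreatest_spec (P := fun k => s.take k <:+ s.take m) (m := 0)
    (n := m - 1) (Nat.zero_le _) (by simp)
  simpa [pf] using h

lemma le_pf (s : List Char) (m k : ℕ) (hk : k ≤ m - 1) (h : s.take k <:+ s.take m) :
    k ≤ pf s m := Nat.le_findGreatest hk h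

-- exit situation of the while loop: k is a border tail, no border of s.take (m+1)
-- reaches beyond k, and either k = 0 or the next characters match.
lemma pf_succ_of_exit (s : List Char) (m k : ℕ) (_hm : 1 ≤ m) (hmN : m < s.length)
    (hkm : k < m) (hsfx : s.take k <:+ s.take m)
    (hmax : ∀ j, j < m → s.take (j+1) <:+ s.take (m+1) → j = k ∨ (j < k ∧ s.take j <:+ s.take k))
    (hex : k = 0 ∨ s.getD k ' ' = s.getD m ' ') :
    pf s (m+1) = (if s.getD k ' ' = s.getD m ' ' then k + 1 else k) := by
  have hkN : k < s.length := lt_trans hkm hmN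
  by_cases heq : s.getD k ' ' = s.getD m ' '
  · rw [if_pos heq]
    unfold pf
    simp only [Nat.add_sub_cancel]
    rw [Nat.findGreatest_eq_iff]
    refine ⟨hkm, fun _ => (border_succ_iff s m k hmN hkN).mpr ⟨heq, hsfx⟩, ?_⟩
    intro j hj hjm hP
    have hj1 : j - 1 + 1 = j := by omega
    rcases hmax (j-1) (by omega) (by rwa [hj1]) with h | h <;> omega
  · have hk0 : k = 0 := hex.resolve_right heq
    rw [if_neg heq]
    subst hk0
    unfold pf
    simp only [Nat.add_sub_cancel]
    rw [Nat.findGreatest_eq_zero_iff]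
    intro j hj0 hjm hP
    have hj1 : j - 1 + 1 = j := by omega
    rcases hmax (j-1) (by omega) (by rwa [hj1]) with h | h
    · have hj : j = 1 := by omega
      subst hj
      exact heq ((border_succ_iff s m 0 hmN (by omega)).mp hP).1
    · omega

lemma fall_spec (s : List Char) (pi : List Nat) (m : ℕ) (hm : 1 ≤ m) (hmN : m < s.length)
    (hpi : ∀ j, 1 ≤ j → j ≤ m → pi.getD (j-1) 0 = pf s j) :
    ∀ fuel k, k ≤ fuel → k < m → s.take k <:+ s.take m →
    (∀ j, j < m → s.take (j+1) <:+ s.take (m+1) → j = k ∨ (j < k ∧ s.take j <:+ s.take k)) →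
    pf s (m+1) =
      (if s.getD (kmpFall s pi (s.getD m ' ') fuel k) ' ' = s.getD m ' '
       then kmpFall s pi (s.getD m ' ') fuel k + 1
       else kmpFall s pi (s.getD m ' ') fuel k) := by
  intro fuel
  induction fuel with
  | zero =>
    intro k hk hkm hsfx hmax
    have hk0 : k = 0 := Nat.le_zero.mp hk
    subst hk0
    simp only [kmpFall]
    exact pf_succ_of_exit s m 0 hm hmN hkm hsfx hmax (Or.inl rfl)
  | succ fuel ih =>
    intro k hk hkm hsfx hmax
    simp only [kmpFall]
    by_cases hcond : 0 < k ∧ ¬ (s.getD k ' ' = s.getD m ' ')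
    · rw [if_pos hcond]
      have hpik : pi.getD (k-1) 0 = pf s k := hpi k hcond.1 (le_of_lt hkm)
      rw [hpik]
      have hpfk := pf_le s k
      have hpflt := pf_lt s k hcond.1
      apply ih
      · omega
      · omega
      · exact (pf_suffix s k).trans hsfx
      · intro j hj hPj
        rcases hmax j hj hPj with rfl | ⟨hjk, hjs⟩
        · exact absurd ((border_succ_iff s m j hmN (lt_trans hkm hmN)).mp hPj).1 hcond.2
        · have hjle : j ≤ pf s k := le_pf s k j (by omega) hjs
          rcases eq_or_lt_of_le hjle with h' | h'
          · exact Or.inl h'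
          · refine Or.inr ⟨h', suffix_of_suffix_le hjs (pf_suffix s k) ?_⟩
            have hkN : k < s.length := lt_trans hkm hmN
            simp only [List.length_take]
            omega
    · rw [if_neg hcond]
      rw [not_and, not_not] at hcond
      have hex : k = 0 ∨ s.getD k ' ' = s.getD m ' ' := by
        rcases Nat.eq_zero_or_pos k with h | h
        · exact Or.inl h
        · exact Or.inr (hcond h)
      exact pf_succ_of_exit s m k hm hmN hkm hsfx hmax hex

lemma hmax_init (s : List Char) (m : ℕ) (hm : 1 ≤ m) (hmN : m < s.length) :
    ∀ j, j < m → s.take (j+1) <:+ s.take (m+1) →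
      j = pf s m ∨ (j < pf s m ∧ s.take j <:+ s.take (pf s m)) := by
  intro j hj hPj
  have hjN : j < s.length := lt_trans hj hmN
  have h := (border_succ_iff s m j hmN hjN).mp hPj
  have hjle : j ≤ pf s m := le_pf s m j (by omega) h.2
  rcases eq_or_lt_of_le hjle with h' | h'
  · exact Or.inl h'
  · refine Or.inr ⟨h', suffix_of_suffix_le h.2 (pf_suffix s m) ?_⟩
    have := pf_lt s m (by omega)
    simp only [List.length_take]
    omega

lemma ite_cond_comm {α : Type} (a b : Char) (x y : α) :
    (if a = b then x else y) = (if b = a then x else y) := by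
  rcases eq_or_ne a b with h | h
  · rw [if_pos h, if_pos h.symm]
  · rw [if_neg h, if_neg (Ne.symm h)]

lemma kmp_inv (s : List Char) :
    ∀ p, p ≤ s.length - 1 →
    (List.range' 1 p).foldl
      (fun st i =>
        let k1 := kmpFall s st.1 (s.getD i ' ') st.2 st.2
        let k2 := if s.getD i ' ' = s.getD k1 ' ' then k1 + 1 else k1
        (st.1 ++ [k2], k2))
      ([0], 0)
    = ((List.range (p+1)).map (fun j => pf s (j+1)), pf s (p+1)) := by
  intro p
  induction p with
  | zero =>
    intro _
    simp [pf]
  | succ p ih =>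
    intro hp
    have hrange : List.range' 1 (p+1) = List.range' 1 p ++ [1+p] := by
      simpa using List.range'_concat (s := 1) (n := p) (step := 1)
    rw [hrange, List.foldl_append, ih (by omega)]
    simp only [List.foldl_cons, List.foldl_nil]
    have hmN : p + 1 < s.length := by omega
    have hpi : ∀ j, 1 ≤ j → j ≤ p + 1 →
        ((List.range (p+1)).map (fun j => pf s (j+1))).getD (j-1) 0 = pf s j := by
      intro j hj1 hj2
      rw [List.getD_eq_getElem?_getD, List.getElem?_map,
        List.getElem?_range (by omega : j - 1 < p + 1)]
      simp only [Option.map_some, Option.getD_some]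
      congr 1
      omega
    have hstep := fall_spec s ((List.range (p+1)).map (fun j => pf s (j+1))) (p+1)
      (by omega) hmN hpi (pf s (p+1)) (pf s (p+1)) le_rfl
      (pf_lt s (p+1) (by omega)) (pf_suffix s (p+1)) (hmax_init s (p+1) (by omega) hmN)
    have h1p : 1 + p = p + 1 := by omega
    rw [h1p, ite_cond_comm, ← hstep, List.range_succ (n := p+1), List.map_append]
    rfl

lemma kmpLoop_snd (s : List Char) (hN : 1 ≤ s.length) : (kmpLoop s).2 = pf s s.length := by
  unfold kmpLoop
  rw [kmp_inv s (s.length - 1) le_rfl]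
  have h : s.length - 1 + 1 = s.length := by omega
  rw [h]

-- a length-k prefix of s = nw ++ sep :: cur is a suffix of s iff it avoids the
-- separator on both sides, i.e. iff it is an overlap of current/new.
lemma border_iff_overlap (cur nw : List Char) (hcur : '\x00' ∉ cur) (hnw : '\x00' ∉ nw) (k : ℕ)
    (hk : k < (nw ++ '\x00' :: cur).length) :
    ((nw ++ '\x00' :: cur).take k <:+ (nw ++ '\x00' :: cur)) ↔
      (k ≤ min cur.length nw.length ∧ cur.drop (cur.length - k) = nw.take k) := by
  have hN : (nw ++ '\x00' :: cur).length = nw.length + cur.length + 1 := by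
    simp [List.length_append]; omega
  have hlen : ((nw ++ '\x00' :: cur).take k).length = k := by
    simp [List.length_take]; omega
  have hrw : ∀ hkn : k ≤ nw.length, ∀ hkc : k ≤ cur.length,
      (nw ++ '\x00' :: cur).take k = nw.take k ∧
      (nw ++ '\x00' :: cur).drop ((nw ++ '\x00' :: cur).length - k) = cur.drop (cur.length - k) := by
    intro hkn hkc
    constructor
    · exact List.take_append_of_le_length hkn
    · rw [hN, List.drop_append]
      have h1 : nw.drop (nw.length + cur.length + 1 - k) = [] :=
        List.drop_eq_nil_of_le (by omega)
      have h2 : nw.length + cur.length + 1 - k - nw.length = (cur.length - k) + 1 := by omega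
      rw [h1, h2, List.drop_succ_cons, List.nil_append]
  rw [List.suffix_iff_eq_drop, hlen]
  constructor
  · intro e
    have hkn : k ≤ nw.length := by
      by_contra h
      have hL : ((nw ++ '\x00' :: cur).take k)[nw.length]? = some '\x00' := by
        rw [List.getElem?_take_of_lt (by omega), List.getElem?_append_right le_rfl]
        simp
      have hR : ((nw ++ '\x00' :: cur).drop ((nw ++ '\x00' :: cur).length - k))[nw.length]?
          = cur[(nw ++ '\x00' :: cur).length - k - 1]? := by
        rw [List.getElem?_drop]
        rw [List.getElem?_append_right (by omega)]
        have h2 : (nw ++ '\x00' :: cur).length - k + nw.length - nw.length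
            = ((nw ++ '\x00' :: cur).length - k - 1) + 1 := by omega
        rw [h2, List.getElem?_cons_succ]
      rw [e, hR] at hL
      have hidx : (nw ++ '\x00' :: cur).length - k - 1 < cur.length := by omega
      rw [List.getElem?_eq_getElem hidx] at hL
      exact hcur (Option.some.inj hL ▸ List.getElem_mem hidx)
    have hkc : k ≤ cur.length := by
      by_contra h
      have hi : k - cur.length - 1 < k := by omega
      have hin : k - cur.length - 1 < nw.length := by omega
      have hL : ((nw ++ '\x00' :: cur).take k)[k - cur.length - 1]? = nw[k - cur.length - 1]? := by
        rw [List.getElem?_take_of_lt hi, List.getElem?_append_left hin]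
      have hR : ((nw ++ '\x00' :: cur).drop ((nw ++ '\x00' :: cur).length - k))[k - cur.length - 1]?
          = some '\x00' := by
        rw [List.getElem?_drop]
        have : (nw ++ '\x00' :: cur).length - k + (k - cur.length - 1) = nw.length := by omega
        rw [this, List.getElem?_append_right le_rfl]
        simp
      rw [e, hR] at hL
      rw [List.getElem?_eq_getElem hin] at hL
      exact hnw ((Option.some.inj hL).symm ▸ List.getElem_mem hin)
    obtain ⟨r1, r2⟩ := hrw hkn hkc
    rw [r1, r2] at e
    exact ⟨by omega, e.symm⟩
  · rintro ⟨hmin, hq⟩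
    obtain ⟨r1, r2⟩ := hrw (by omega) (by omega)
    rw [r1, r2, hq]

lemma pf_concat (cur nw : List Char) (hcur : '\x00' ∉ cur) (hnw : '\x00' ∉ nw) :
    pf (nw ++ '\x00' :: cur) (nw ++ '\x00' :: cur).length = ov cur nw := by
  have hN : (nw ++ '\x00' :: cur).length = nw.length + cur.length + 1 := by
    simp [List.length_append]; omega
  have htl : (nw ++ '\x00' :: cur).take (nw ++ '\x00' :: cur).length = (nw ++ '\x00' :: cur) :=
    List.take_length
  apply le_antisymm
  · have hlt : pf (nw ++ '\x00' :: cur) (nw ++ '\x00' :: cur).length < (nw ++ '\x00' :: cur).length :=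
      pf_lt _ _ (by omega)
    have hsfx := pf_suffix (nw ++ '\x00' :: cur) (nw ++ '\x00' :: cur).length
    rw [htl] at hsfx
    obtain ⟨h1, h2⟩ := (border_iff_overlap cur nw hcur hnw _ hlt).mp hsfx
    exact Nat.le_findGreatest h1 h2
  · have hq0 : (fun i => cur.drop (cur.length - i) = nw.take i) 0 := by simp
    have hq : cur.drop (cur.length - ov cur nw) = nw.take (ov cur nw) := by
      have h := Nat.findGreatest_spec (P := fun i => cur.drop (cur.length - i) = nw.take i)
        (m := 0) (n := min cur.length nw.length) (Nat.zero_le _) hq0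
      simpa [ov] using h
    have hle : ov cur nw ≤ min cur.length nw.length := Nat.findGreatest_le _
    have hb := (border_iff_overlap cur nw hcur hnw (ov cur nw) (by omega)).mpr ⟨hle, hq⟩
    apply le_pf _ _ _ (by omega)
    rw [htl]
    exact hb

lemma a_fold (c n : List Char) (m : ℕ) :
    (PySem.List.pyRange 1 ((m : Int) + 1) 1).foldl
      (fun ov i =>
        if PySem.List.slice c (some (-i)) none = PySem.List.slice n none (some i) then i
        else ov) 0
    = ((Nat.findGreatest (fun i => c.drop (c.length - i) = n.take i) m : ℕ) : Int) := by
  induction m with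
  | zero =>
    rw [show ((0:ℕ):Int) + 1 = 1 by norm_num, PySem.List.pyRange_one_eq_nil le_rfl]
    simp
  | succ m ih =>
    have hcast : (((m+1 : ℕ)):Int) + 1 = (((m:ℕ):Int) + 1) + 1 := by push_cast; ring
    rw [hcast, PySem.List.pyRange_one_succ_right (by omega), List.foldl_append, ih]
    simp only [List.foldl_cons, List.foldl_nil]
    have hi : ((m:ℕ):Int) + 1 = (((m+1:ℕ)):Int) := by push_cast; ring
    rw [hi, PySem.List.slice_from_neg_natCast c (m+1) (by omega),
      PySem.List.slice_to_natCast n (m+1)]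
    rw [Nat.findGreatest_succ]
    split_ifs with h
    · rfl
    · rfl

lemma no_nul_of_dom (s : String) (h : pvDomStr s = true) : '\x00' ∉ s.toList := by
  intro hm
  have hch := List.all_eq_true.mp h _ hm
  exact absurd hch (by decide)

lemma no_nul_lstrip (s : String) (h : '\x00' ∉ s.toList) :
    '\x00' ∉ (PySem.Str.lstrip s).toList := by
  intro hm
  rw [PySem.Str.toList_lstrip] at hm
  exact h ((List.dropWhile_sublist _).subset (by simpa [PySem.Chars.lstrip] using hm))

lemma a_fold_ov (c n : List Char) :
    (PySem.List.pyRange 1 (min (c.length : Int) (n.length : Int) + 1) 1).foldl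
      (fun ov i =>
        if PySem.List.slice c (some (-i)) none = PySem.List.slice n none (some i) then i
        else ov) 0
    = ((ov c n : ℕ) : Int) := by
  rw [← Nat.cast_min]
  exact a_fold c n (min c.length n.length)

lemma kmp_ov (c n : List Char) (hc : '\x00' ∉ c) (hn : '\x00' ∉ n) :
    (kmpLoop (n ++ '\x00' :: c)).2 = ov c n := by
  rw [kmpLoop_snd _ (by simp [List.length_append]; omega)]
  exact pf_concat c n hc hn

-- ===== VERDICT (by name: the statement is the Claim_ definition above) =====
theorem smart_append_text_spec : Claim_equal_smart_append_text := by
  intro ct nt hdom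
  have hdc : pvDomStr ct = true := by
    have := hdom
    unfold Dom_smart_append_text at this
    exact (Bool.and_eq_true_iff.mp this).1
  have hdn : pvDomStr nt = true := by
    have := hdom
    unfold Dom_smart_append_text at this
    exact (Bool.and_eq_true_iff.mp this).2
  unfold Spec_smart_append_text smart_append_text smart_append_text_alt
  simp only [beq_iff_eq]
  by_cases h1 : PySem.Str.len nt = 0
  · simp only [if_pos h1]
  · simp only [if_neg h1]
    by_cases h2 : PySem.Str.len ct = 0
    · simp only [if_pos h2]
    · simp only [if_neg h2]
      have hc : '\x00' ∉ ct.toList := no_nul_of_dom ct hdc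
      have hn : '\x00' ∉ (PySem.Str.lstrip nt).toList :=
        no_nul_lstrip nt (no_nul_of_dom nt hdn)
      rw [a_fold_ov ct.toList (PySem.Str.lstrip nt).toList,
        kmp_ov ct.toList (PySem.Str.lstrip nt).toList hc hn]
      by_cases hov : 0 < ov ct.toList (PySem.Str.lstrip nt).toList
      · rw [if_pos (by exact_mod_cast hov), if_pos hov]
      · rw [if_neg (by exact_mod_cast hov), if_neg hov]
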